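-- pv_equiv track=rewrite | github.com/allora-network/alloraRAGmodel | slack.py | _split_text_for_slack
-- ===== SOURCE A (Python) =====
-- from typing import Optional, List
--
-- def _split_text_for_slack(text: str, max_length: int) -> List[str]:
--     """
--     Split text into chunks that fit within Slack's block character limit.
--     Tries to split at paragraph boundaries, then sentence boundaries, then word boundaries.
--     """
--     if len(text) <= max_length:
--         return [text]
--
--     chunks = []
--     remaining = text
--
--     while remaining:
--         if len(remaining) <= max_length:
--             chunks.append(remaining)
--             break
--
--         # Find a good split point within max_length
--         split_point = max_length
--
--         # Try to split at paragraph boundary (double newline)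
--         last_para = remaining.rfind('\n\n', 0, max_length)
--         if last_para > max_length // 2:  # Only use if it's past halfway
--             split_point = last_para + 2
--         else:
--             # Try to split at single newline
--             last_newline = remaining.rfind('\n', 0, max_length)
--             if last_newline > max_length // 2:
--                 split_point = last_newline + 1
--             else:
--                 # Try to split at sentence boundary
--                 for punct in ['. ', '! ', '? ']:
--                     last_sent = remaining.rfind(punct, 0, max_length)
--                     if last_sent > max_length // 2:
--                         split_point = last_sent + 2
--                         break
--                 else:
--                     # Fall back to word boundary
--                     last_space = remaining.rfind(' ', 0, max_length)
--                     if last_space > max_length // 2: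
--                         split_point = last_space + 1
--
--         chunks.append(remaining[:split_point].rstrip())
--         remaining = remaining[split_point:].lstrip()
--
--     return chunks
-- ===== SOURCE B (Python) =====
-- from typing import List
--
-- _BOUNDARIES = (('\n\n', 2), ('\n', 1), ('. ', 2), ('! ', 2), ('? ', 2), (' ', 1))
--
-- def _split_text_for_slack(text: str, max_length: int) -> List[str]:
--     """Split text into chunks within max_length, preferring paragraph, then
--     sentence, then word boundaries.  Two staged passes over the original string:
--     stage 1 collects (start, split) index spans using offset-windowed rfind over
--     one uniform boundary table (no re-slicing of the remaining text); stage 2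
--     materialises the chunks from the spans."""
--     n = len(text)
--     if n <= max_length:
--         return [text]
--
--     half = max_length // 2
--
--     # stage 1: collect spans
--     spans = []
--     start = 0
--     while n - start > max_length:
--         end = start + max_length
--         sp = end
--         for sub, bump in _BOUNDARIES:
--             p = text.rfind(sub, start, end)
--             if p - start > half:
--                 sp = p + bump
--                 break
--         spans.append((start, sp))
--         start = sp
--         while start < n and text[start].isspace():
--             start += 1
--
--     # stage 2: materialise chunks
--     chunks = [text[a:b].rstrip() for a, b in spans]
--     if start < n:
--         chunks.append(text[start:])
--     return chunks
-- ===== Notes on version B (the rewrite author's own statement) =====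
-- stated objective: alternative
-- what changed: B replaces A's re-slice-and-retry loop (fresh copy of `remaining` plus a four-level if/else-with-for boundary chain per chunk) by two staged passes over the original string: stage 1 walks a moving start index collecting (start, split) spans, picking the split point by the first hit in one uniform boundary table searched with offset-windowed rfind; stage 2 materialises the chunks from the spans.
-- outside the precondition, e.g. on _split_text_for_slack('', -1): A returns [], B raises IndexError
import Mathlib
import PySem

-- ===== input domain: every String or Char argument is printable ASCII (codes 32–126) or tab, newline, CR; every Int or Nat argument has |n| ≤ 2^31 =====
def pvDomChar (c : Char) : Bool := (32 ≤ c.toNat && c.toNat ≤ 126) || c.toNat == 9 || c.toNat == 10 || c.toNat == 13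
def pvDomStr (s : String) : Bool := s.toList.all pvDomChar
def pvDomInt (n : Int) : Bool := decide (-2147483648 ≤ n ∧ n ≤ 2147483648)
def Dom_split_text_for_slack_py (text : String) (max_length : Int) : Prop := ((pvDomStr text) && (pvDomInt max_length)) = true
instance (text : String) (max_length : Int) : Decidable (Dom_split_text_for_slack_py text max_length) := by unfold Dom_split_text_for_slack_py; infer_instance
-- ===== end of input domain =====

-- B replaces A's re-slice-and-retry loop by two staged passes over the original string:
-- stage 1 collects (start, split) spans via offset-windowed rfind over one uniform
-- boundary table, stage 2 materialises the chunks (no per-chunk copies of the remainder).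

-- ===== PORT A =====
-- split-point computation of one iteration of A's while-loop, on `remaining`
-- (the Python `for punct in ['. ', '! ', '? ']: … break / else` is the 3-step chain below)
def pvASplit (rem : List Char) (m : Int) : Int :=
  let lastPara := PySem.Chars.rfindFrom rem ('\n' :: '\n' :: []) 0 (some m)
  if PySem.Int.floordiv m 2 < lastPara then lastPara + 2
  else
    let lastNl := PySem.Chars.rfindFrom rem ('\n' :: []) 0 (some m)
    if PySem.Int.floordiv m 2 < lastNl then lastNl + 1
    else
      let s1 := PySem.Chars.rfindFrom rem ('.' :: ' ' :: []) 0 (some m)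
      if PySem.Int.floordiv m 2 < s1 then s1 + 2
      else
        let s2 := PySem.Chars.rfindFrom rem ('!' :: ' ' :: []) 0 (some m)
        if PySem.Int.floordiv m 2 < s2 then s2 + 2
        else
          let s3 := PySem.Chars.rfindFrom rem ('?' :: ' ' :: []) 0 (some m)
          if PySem.Int.floordiv m 2 < s3 then s3 + 2
          else
            let lastSpace := PySem.Chars.rfindFrom rem (' ' :: []) 0 (some m)
            if PySem.Int.floordiv m 2 < lastSpace then lastSpace + 1
            else m

-- A's `while remaining:` loop; fuel only makes the recursion total (Python loops forever
-- on the inputs Pre_ excludes), inside Pre_ the initial fuel is never exhausted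
def pvALoop (m : Int) : Nat → List Char → List (List Char) → List (List Char)
  | 0, _, acc => acc
  | fuel + 1, rem, acc =>
    if rem.isEmpty then acc
    else if (rem.length : Int) ≤ m then acc ++ [rem]
    else
      let sp := pvASplit rem m
      pvALoop m fuel (PySem.Chars.lstrip (PySem.List.slice rem (some sp) none))
        (acc ++ [PySem.Chars.rstrip (PySem.List.slice rem none (some sp))])

def split_text_for_slack_py (text : String) (max_length : Int) : List String :=
  if PySem.Str.len text ≤ max_length then [text]
  else (pvALoop max_length (text.toList.length + 1) text.toList []).map (fun cs => String.ofList cs)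

-- ===== PORT B =====
-- Source B's module-level boundary table _BOUNDARIES
def pvBoundaries : List (List Char × Int) :=
  [('\n' :: '\n' :: [], 2), ('\n' :: [], 1), ('.' :: ' ' :: [], 2),
   ('!' :: ' ' :: [], 2), ('?' :: ' ' :: [], 2), (' ' :: [], 1)]

-- Source B's `for sub, bump in _BOUNDARIES: … break` = first table entry whose windowed
-- rfind lands past the halfway mark, defaulting to the window end
def pvBFind (cs : List Char) (start m half : Int) : Int :=
  (pvBoundaries.findSome? (fun sk =>
      let p := PySem.Chars.rfindFrom cs sk.1 start (some (start + m))
      if half < p - start then some (p + sk.2) else none)).getD (start + m)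

-- Source B's inner `while start < n and text[start].isspace(): start += 1`
def pvSkipWs (cs : List Char) (j : Nat) : Nat :=
  if h : j < cs.length then
    if PySem.Chars.isspace cs[j] then pvSkipWs cs (j + 1) else j
  else j
termination_by cs.length - j

-- stage 1: Source B's `while n - start > max_length:` span-collecting loop;
-- returns the spans and the final start index (fuel never exhausts inside Pre_)
def pvSpans (cs : List Char) (m half : Int) : Nat → Nat → List (Nat × Int) × Nat
  | 0, start => ([], start)
  | fuel + 1, start =>
    if (cs.length : Int) - (start : Int) ≤ m then ([], start)
    else
      let sp := pvBFind cs (start : Int) m half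
      let rest := pvSpans cs m half fuel (pvSkipWs cs sp.toNat)
      ((start, sp) :: rest.1, rest.2)

def split_text_for_slack_py_alt (text : String) (max_length : Int) : List String :=
  let cs := text.toList
  if (cs.length : Int) ≤ max_length then [text]
  else
    let r := pvSpans cs max_length (PySem.Int.floordiv max_length 2) (cs.length + 1) 0
    -- stage 2: materialise the chunks from the spans, plus the final tail
    r.1.map (fun ab =>
        String.ofList (PySem.Chars.rstrip (PySem.List.slice cs (some (ab.1 : Int)) (some ab.2))))
      ++ (if r.2 < cs.length
          then [String.ofList (PySem.List.slice cs (some ((r.2 : Nat) : Int)) none)] else [])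

-- ===== PRECONDITION & SPEC =====
-- Pre_ excludes max_length ≤ 0 with nonempty text, where A's loop never terminates
-- (split_point ≤ 0 leaves `remaining` unchanged), and the degenerate ("", max_length < 0),
-- where A returns [] but B's whitespace skip indexes text[-1] (B raises IndexError).
def Pre_split_text_for_slack_py (text : String) (max_length : Int) : Prop :=
  1 ≤ max_length ∨ (text = "" ∧ 0 ≤ max_length)
instance (text : String) (max_length : Int) : Decidable (Pre_split_text_for_slack_py text max_length) := by unfold Pre_split_text_for_slack_py; infer_instance
def pvWitness_split_text_for_slack_py : String × Int := ("one two. three four", 8)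

def Spec_split_text_for_slack_py (text : String) (max_length : Int) (out : List String) : Prop := out = split_text_for_slack_py_alt text max_length
instance (text : String) (max_length : Int) (out : List String) : Decidable (Spec_split_text_for_slack_py text max_length out) := by unfold Spec_split_text_for_slack_py; infer_instance

-- ===== CLAIM (what is proved, stated in full; the proofs are below) =====
def Claim_equal_split_text_for_slack_py : Prop := ∀ (text : String) (max_length : Int), Dom_split_text_for_slack_py text max_length → Pre_split_text_for_slack_py text max_length → Spec_split_text_for_slack_py text max_length (split_text_for_slack_py text max_length)

-- ===== LEMMAS AND PROOFS =====

-- rfind on the empty string finds nothing (nonempty needle)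
theorem pvRfindNil (sub : List Char) (hsub : sub ≠ []) : PySem.Chars.rfind [] sub = -1 := by
  cases sub with
  | nil => exact absurd rfl hsub
  | cons c t => simp [PySem.Chars.rfind, PySem.Chars.rfind.go, List.isPrefixOf]

-- Source B's windowed rfind(sub, start, start+m) equals A's rfind on the remaining suffix, shifted
theorem pvRfindOffset (cs : List Char) (sub : List Char) (i : Nat) (m : Int)
    (hm : 0 ≤ m) (hsub : sub ≠ []) :
    PySem.Chars.rfindFrom cs sub (i : Int) (some ((i : Int) + m)) =
      (if PySem.Chars.rfindFrom (cs.drop i) sub 0 (some m) = -1 then -1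
       else (i : Int) + PySem.Chars.rfindFrom (cs.drop i) sub 0 (some m)) := by
  have hI : ¬((i : Int) < 0) := by omega
  have hIm : ¬((i : Int) + m < 0) := by omega
  have hMneg : ¬(m < 0) := by omega
  simp only [PySem.Chars.rfindFrom, if_neg hI, if_neg hIm, if_neg hMneg, lt_self_iff_false,
    if_false, List.length_drop, Int.toNat_natCast, List.drop_zero, Int.toNat_zero]
  have hEp : ¬((if ((cs.length - i : Nat) : Int) < m then ((cs.length - i : Nat) : Int) else m) < 0) := by
    split_ifs <;> omega
  rw [if_neg hEp, List.drop_take]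
  have hE : (if (cs.length : Int) < (i : Int) + m then (cs.length : Int) else (i : Int) + m).toNat - i
      = (if ((cs.length - i : Nat) : Int) < m then ((cs.length - i : Nat) : Int) else m).toNat := by
    split_ifs <;> omega
  rw [hE]
  set r := PySem.Chars.rfind
    (List.take (if ((cs.length - i : Nat) : Int) < m then ((cs.length - i : Nat) : Int) else m).toNat
      (List.drop i cs)) sub with hr
  by_cases hlt : (if (cs.length : Int) < (i : Int) + m then (cs.length : Int) else (i : Int) + m) < (i : Int)
  · rw [if_pos hlt]
    have hgt : cs.length < i := by by_contra hc; revert hlt; split_ifs <;> omega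
    have hz : (if ((cs.length - i : Nat) : Int) < m then ((cs.length - i : Nat) : Int) else m).toNat = 0 := by
      split_ifs <;> omega
    have : r = -1 := by rw [hr, hz, List.take_zero]; exact pvRfindNil sub hsub
    simp [this]
  · rw [if_neg hlt]
    by_cases hR : r = -1
    · simp [hR]
    · simp [hR]

-- the split point B's table scan computes is A's chain result, shifted by the start index
theorem pvBFindOffset (cs : List Char) (i : Nat) (m : Int) (hm : 1 ≤ m) :
    pvBFind cs (i : Int) m (PySem.Int.floordiv m 2) = (i : Int) + pvASplit (cs.drop i) m := by
  have h0 : 0 ≤ PySem.Int.floordiv m 2 := by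
    rw [PySem.Int.floordiv_eq_ediv_of_pos (by omega)]
    exact Int.ediv_nonneg (by omega) (by omega)
  simp only [pvBFind, pvBoundaries, List.findSome?, pvASplit]
  rw [pvRfindOffset cs ('\n' :: '\n' :: []) i m (by omega) (by simp),
      pvRfindOffset cs ('\n' :: []) i m (by omega) (by simp),
      pvRfindOffset cs ('.' :: ' ' :: []) i m (by omega) (by simp),
      pvRfindOffset cs ('!' :: ' ' :: []) i m (by omega) (by simp),
      pvRfindOffset cs ('?' :: ' ' :: []) i m (by omega) (by simp),
      pvRfindOffset cs (' ' :: []) i m (by omega) (by simp)]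
  generalize PySem.Chars.rfindFrom (cs.drop i) ('\n' :: '\n' :: []) 0 (some m) = r1
  generalize PySem.Chars.rfindFrom (cs.drop i) ('\n' :: []) 0 (some m) = r2
  generalize PySem.Chars.rfindFrom (cs.drop i) ('.' :: ' ' :: []) 0 (some m) = r3
  generalize PySem.Chars.rfindFrom (cs.drop i) ('!' :: ' ' :: []) 0 (some m) = r4
  generalize PySem.Chars.rfindFrom (cs.drop i) ('?' :: ' ' :: []) 0 (some m) = r5
  generalize PySem.Chars.rfindFrom (cs.drop i) (' ' :: []) 0 (some m) = r6
  generalize PySem.Int.floordiv m 2 = half at h0 ⊢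
  have e1 : ∀ (r k : Int),
      (if half < (if r = -1 then -1 else (i : Int) + r) - (i : Int)
        then some ((if r = -1 then -1 else (i : Int) + r) + k) else (none : Option Int))
        = (if half < r then some ((i : Int) + (r + k)) else none) := by
    intro r k
    by_cases hr : r = -1
    · rw [hr, if_pos rfl, if_neg (by omega), if_neg (by omega)]
    · rw [if_neg hr]
      by_cases hc : half < (i : Int) + r - (i : Int)
      · rw [if_pos hc, if_pos (by omega)]; congr 1; ring
      · rw [if_neg hc, if_neg (by omega)]
  simp only [e1]
  split_ifs <;> simp [Option.getD]
-- A's split point is at least 1 (so both loops advance)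
theorem pvASplit_pos (rem : List Char) (m : Int) (hm : 1 ≤ m) : 1 ≤ pvASplit rem m := by
  have h0 : 0 ≤ PySem.Int.floordiv m 2 := by
    rw [PySem.Int.floordiv_eq_ediv_of_pos (by omega)]
    exact Int.ediv_nonneg (by omega) (by omega)
  simp only [pvASplit]
  split_ifs <;> omega

-- skipping whitespace never moves the index backwards
theorem pvSkipWs_ge (cs : List Char) (j : Nat) : j ≤ pvSkipWs cs j := by
  induction j using pvSkipWs.induct (cs := cs) with
  | case1 j h hsp ih => rw [pvSkipWs, dif_pos h, if_pos hsp]; omega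
  | case2 j h hsp => rw [pvSkipWs, dif_pos h, if_neg hsp]
  | case3 j h => rw [pvSkipWs, dif_neg h]

-- skipping whitespace by index is lstrip of the suffix
theorem pvSkipWs_drop (cs : List Char) (j : Nat) :
    cs.drop (pvSkipWs cs j) = List.dropWhile PySem.Chars.isspace (cs.drop j) := by
  induction j using pvSkipWs.induct (cs := cs) with
  | case1 j h hsp ih =>
      rw [pvSkipWs, dif_pos h, if_pos hsp, ih, List.drop_eq_getElem_cons h,
          List.dropWhile_cons_of_pos hsp]
  | case2 j h hsp =>
      rw [pvSkipWs, dif_pos h, if_neg hsp, List.drop_eq_getElem_cons h,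
          List.dropWhile_cons_of_neg (by simpa using hsp)]
  | case3 j h =>
      rw [pvSkipWs, dif_neg h]
      have : cs.drop j = [] := List.drop_eq_nil_of_le (by omega)
      simp [this]

-- A's accumulating loop produces exactly B's stage-2 rendering of B's stage-1 spans
theorem pvLoopEq (cs : List Char) (m : Int) (hm : 1 ≤ m) :
    ∀ (fuel i : Nat) (acc : List (List Char)), cs.length - i + 1 ≤ fuel →
      pvALoop m fuel (cs.drop i) acc =
        acc
          ++ (pvSpans cs m (PySem.Int.floordiv m 2) fuel i).1.map
              (fun ab => PySem.Chars.rstrip (PySem.List.slice cs (some (ab.1 : Int)) (some ab.2)))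
          ++ (if (pvSpans cs m (PySem.Int.floordiv m 2) fuel i).2 < cs.length
              then [PySem.List.slice cs (some (((pvSpans cs m (PySem.Int.floordiv m 2) fuel i).2 : Nat) : Int)) none]
              else []) := by
  intro fuel
  induction fuel with
  | zero => intro i acc hfu; omega
  | succ k ih =>
    intro i acc hfu
    simp only [pvALoop, pvSpans]
    by_cases hend : (cs.length : Int) - (i : Int) ≤ m
    · rw [if_pos hend]
      by_cases hlt : i < cs.length
      · have hne : ¬ (cs.drop i).isEmpty = true := by
          simp only [List.isEmpty_iff, List.drop_eq_nil_iff]; omega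
        rw [if_neg hne, if_pos (by rw [List.length_drop]; omega)]
        simp [hlt, PySem.List.slice_from_natCast]
      · have hnil : cs.drop i = [] := List.drop_eq_nil_of_le (by omega)
        rw [hnil]
        simp [hlt]
    · rw [if_neg hend]
      have hlen : ¬ ((cs.drop i).length : Int) ≤ m := by rw [List.length_drop]; omega
      have hne : ¬ (cs.drop i).isEmpty = true := by
        simp only [List.isEmpty_iff, List.drop_eq_nil_iff]; omega
      rw [if_neg hne, if_neg hlen]
      have hsplit := pvBFindOffset cs i m hm
      have hsp : 1 ≤ pvASplit (cs.drop i) m := pvASplit_pos _ m hm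
      set sp' := pvASplit (cs.drop i) m with hspdef
      have hcast : sp' = ((sp'.toNat : Nat) : Int) := by omega
      have htn : ((i : Int) + sp').toNat = i + sp'.toNat := by omega
      have hchunk : PySem.List.slice cs (some (i : Int)) (some ((i : Int) + sp'))
          = PySem.List.slice (cs.drop i) none (some sp') := by
        rw [hcast, ← Nat.cast_add, PySem.List.slice_natCast, PySem.List.slice_to_natCast,
            Nat.add_sub_cancel_left]
      have htail : PySem.Chars.lstrip (PySem.List.slice (cs.drop i) (some sp') none)
          = cs.drop (pvSkipWs cs ((i : Int) + sp').toNat) := by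
        rw [show PySem.List.slice (cs.drop i) (some sp') none = (cs.drop i).drop sp'.toNat from
              PySem.List.slice_from _ (by omega),
            pvSkipWs_drop, htn, List.drop_drop]
        simp [PySem.Chars.lstrip]
      have hge : i + 1 ≤ pvSkipWs cs ((i : Int) + sp').toNat := by
        have := pvSkipWs_ge cs ((i : Int) + sp').toNat
        omega
      rw [hsplit, htail,
          ih (pvSkipWs cs ((i : Int) + sp').toNat) (acc ++ [PySem.Chars.rstrip (PySem.List.slice (cs.drop i) none (some sp'))]) (by omega)]
      simp only [List.map_cons, hchunk, List.append_assoc, List.cons_append, List.nil_append]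

-- ===== VERDICT (by name: the statement is the Claim_ definition above) =====
theorem split_text_for_slack_py_spec : Claim_equal_split_text_for_slack_py := by
  intro text m _ hpre
  unfold Spec_split_text_for_slack_py split_text_for_slack_py split_text_for_slack_py_alt
  have hlen : PySem.Str.len text = (text.toList.length : Int) := by
    simp [PySem.Str.len_eq]
  by_cases hle : (text.toList.length : Int) ≤ m
  · rw [hlen, if_pos hle, if_pos hle]
  · rw [hlen, if_neg hle, if_neg hle]
    have hm : 1 ≤ m := by
      rcases hpre with h | ⟨ht, hm0⟩
      · exact h
      · exfalso; apply hle; rw [ht]; simpa using hm0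
    have := pvLoopEq text.toList m hm (text.toList.length + 1) 0 [] (by omega)
    rw [List.drop_zero] at this
    rw [this]
    simp [List.map_append, apply_ite (List.map (fun cs => String.ofList cs))]
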